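-- pv_equiv track=rewrite | github.com/kakao/pycon2016apac-gawibawibo | 0814/player_darktaeja.py | show_me_the_hand
-- ===== SOURCE A (Python) =====
-- def show_me_the_hand(records):
--     isChecked_gawi = False
--     isChecked_bawi = False
--     isChekced_bo = False
--     index = len(records)
--
--     for hand, result in reversed(records):
--         if (hand == 'gawi'):
--             isChecked_gawi = True
--         if (hand == 'bawi'):
--             isChecked_bawi = True
--         if (hand == 'bo'):
--             isChekced_bo = True
--
--         if(isChecked_gawi and isChecked_bawi):
--             return 'gawi'
--         elif(isChecked_bawi and isChekced_bo):
--             return 'bawi'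
--         elif(isChekced_bo and isChecked_gawi):
--             return 'bo'
--
--         index = index - 1
--         if (index == 0):
--             if(isChecked_gawi):
--                 return 'bawi'
--             elif(isChecked_bawi):
--                 return 'bo'
--             else:
--                 return 'gawi'
--
--     return 'bo'
-- ===== SOURCE B (Python) =====
-- def show_me_the_hand(records):
--     # Forward pass: record the last occurrence index of each valid hand.
--     lg = lb = lo = -1
--     i = 0
--     for hand, _ in records:
--         if hand == 'gawi':
--             lg = i
--         elif hand == 'bawi':
--             lb = i
--         elif hand == 'bo':
--             lo = i
--         i += 1
--     # Select the two hands with the largest last-occurrence indices.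
--     first, second = (-1, ''), (-1, '')
--     for cand in ((lg, 'gawi'), (lb, 'bawi'), (lo, 'bo')):
--         if cand[0] > first[0]:
--             first, second = cand, first
--         elif cand[0] > second[0]:
--             second = cand
--     if second[0] >= 0:
--         return {frozenset(('gawi', 'bawi')): 'gawi',
--                 frozenset(('bawi', 'bo')): 'bawi',
--                 frozenset(('bo', 'gawi')): 'bo'}[frozenset((first[1], second[1]))]
--     if first[0] >= 0:
--         return {'gawi': 'bawi', 'bawi': 'bo', 'bo': 'gawi'}[first[1]]
--     return 'gawi' if records else 'bo'
-- ===== Notes on version B (the rewrite author's own statement) =====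
-- stated objective: alternative
-- what changed: Instead of A's reverse scan with three flags, early exits and an index countdown, B makes one forward pass recording the last-occurrence index of each valid hand, then picks the two hands with the largest indices (argmax selection) and maps them through a frozenset pair table / single-hand dict.
import Mathlib
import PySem

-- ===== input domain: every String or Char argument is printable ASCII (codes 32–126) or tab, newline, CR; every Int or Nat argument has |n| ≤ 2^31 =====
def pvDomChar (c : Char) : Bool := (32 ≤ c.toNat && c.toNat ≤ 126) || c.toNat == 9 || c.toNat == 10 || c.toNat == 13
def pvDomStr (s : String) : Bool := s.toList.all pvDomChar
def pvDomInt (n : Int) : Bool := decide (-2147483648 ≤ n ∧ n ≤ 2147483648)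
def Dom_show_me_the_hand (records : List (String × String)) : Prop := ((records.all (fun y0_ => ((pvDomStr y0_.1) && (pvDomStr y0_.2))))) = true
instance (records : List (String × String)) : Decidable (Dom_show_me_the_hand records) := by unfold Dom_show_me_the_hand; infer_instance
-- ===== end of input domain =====

-- B replaces A's reverse scan with flags, early exits and an index countdown by a forward
-- pass recording last-occurrence indices plus an argmax selection (objective: alternative).

-- ===== PORT A =====
-- loop of A: state = the three flags and the countdown index, scanning reversed(records)
def show_me_the_hand_go : List (String × String) → Bool → Bool → Bool → Int → String
  | [], _, _, _, _ => "bo"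
  | (hand, _) :: rest, g, b, o, index =>
    let g := if hand = "gawi" then true else g
    let b := if hand = "bawi" then true else b
    let o := if hand = "bo" then true else o
    if g && b then "gawi"
    else if b && o then "bawi"
    else if o && g then "bo"
    else
      let index := index - 1
      if index = 0 then
        if g then "bawi" else if b then "bo" else "gawi"
      else show_me_the_hand_go rest g b o index

def show_me_the_hand (records : List (String × String)) : String :=
  show_me_the_hand_go records.reverse false false false (records.length : Int)

-- ===== PORT B =====
-- Source B's forward loop: last-occurrence index of each valid hand (lg, lb, lo), counter i
def pvLast3 : List (String × String) → Int → Int → Int → Int → Int × Int × Int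
  | [], _, lg, lb, lo => (lg, lb, lo)
  | (hand, _) :: rest, i, lg, lb, lo =>
    if hand = "gawi" then pvLast3 rest (i + 1) i lb lo
    else if hand = "bawi" then pvLast3 rest (i + 1) lg i lo
    else if hand = "bo" then pvLast3 rest (i + 1) lg lb i
    else pvLast3 rest (i + 1) lg lb lo

-- Source B's second loop: keep the two candidates with the largest indices
def pvTop2 : List (Int × String) → Int × String → Int × String → (Int × String) × (Int × String)
  | [], f, s => (f, s)
  | c :: rest, f, s =>
    if c.1 > f.1 then pvTop2 rest c f
    else if c.1 > s.1 then pvTop2 rest f c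
    else pvTop2 rest f s

-- Source B's frozenset-keyed pair table; exact because it is only applied to two DISTINCT valid
-- hands, on which the three frozenset keys are exhaustive (order-insensitive lookup)
def pvPairTable (x y : String) : String :=
  if (x = "gawi" && y = "bawi") || (x = "bawi" && y = "gawi") then "gawi"
  else if (x = "bawi" && y = "bo") || (x = "bo" && y = "bawi") then "bawi"
  else "bo"

def show_me_the_hand_alt (records : List (String × String)) : String :=
  let t := pvLast3 records 0 (-1) (-1) (-1)
  let fs := pvTop2 [(t.1, "gawi"), (t.2.1, "bawi"), (t.2.2, "bo")] (-1, "") (-1, "")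
  if fs.2.1 ≥ 0 then pvPairTable fs.1.2 fs.2.2
  else if fs.1.1 ≥ 0 then
    (if fs.1.2 = "gawi" then "bawi" else if fs.1.2 = "bawi" then "bo" else "gawi")
  else if records = [] then "bo" else "gawi"

-- ===== PRECONDITION & SPEC =====
def Spec_show_me_the_hand (records : List (String × String)) (out : String) : Prop := out = show_me_the_hand_alt records
instance (records : List (String × String)) (out : String) : Decidable (Spec_show_me_the_hand records out) := by unfold Spec_show_me_the_hand; infer_instance

-- ===== CLAIM (what is proved, stated in full; the proofs are below) =====
def Claim_equal_show_me_the_hand : Prop := ∀ (records : List (String × String)), Dom_show_me_the_hand records → Spec_show_me_the_hand records (show_me_the_hand records)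

-- ===== LEMMAS AND PROOFS =====

-- proof-side common spec: the first (at most two) distinct valid hands in reverse order
def pvCollect2 : List (String × String) → List String → List String
  | [], seen => seen
  | (hand, _) :: rest, seen =>
    if (hand = "gawi" || hand = "bawi" || hand = "bo") && !(seen.contains hand) then
      let seen' := seen ++ [hand]
      if seen'.length = 2 then seen' else pvCollect2 rest seen'
    else pvCollect2 rest seen

def pvFinish : List String → String
  | [x, y] => pvPairTable x y
  | [x] => if x = "gawi" then "bawi" else if x = "bawi" then "bo" else "gawi"
  | _ => "gawi"

-- one unfolding step of A's loop, with the index written as rest.length + 1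
lemma pv_go_cons (hand res : String) (rest : List (String × String)) (g b o : Bool) :
    show_me_the_hand_go ((hand, res) :: rest) g b o ((rest.length : Int) + 1) =
      (let g' := if hand = "gawi" then true else g
       let b' := if hand = "bawi" then true else b
       let o' := if hand = "bo" then true else o
       if g' && b' then "gawi"
       else if b' && o' then "bawi"
       else if o' && g' then "bo"
       else if (rest.length : Int) = 0 then
         (if g' then "bawi" else if b' then "bo" else "gawi")
       else show_me_the_hand_go rest g' b' o' (rest.length : Int)) := by
  simp only [show_me_the_hand_go, Int.add_sub_cancel]

-- Invariant: A's three flags record exactly the (at most one) distinct valid hand gathered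
lemma pv_main : ∀ (l : List (String × String)) (s : List String), l ≠ [] →
    (s = [] ∨ s = ["gawi"] ∨ s = ["bawi"] ∨ s = ["bo"]) →
    show_me_the_hand_go l (s.contains "gawi") (s.contains "bawi") (s.contains "bo")
        (l.length : Int)
      = pvFinish (pvCollect2 l s) := by
  intro l
  induction l with
  | nil => intro s h _; exact absurd rfl h
  | cons p rest ih =>
    intro s _ hs
    obtain ⟨hand, res⟩ := p
    have hcast : (((hand, res) :: rest).length : Int) = (rest.length : Int) + 1 := by
      push_cast [List.length_cons]; ring
    rw [hcast, pv_go_cons]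
    rcases eq_or_ne rest [] with rfl | hr
    · rcases hs with rfl | rfl | rfl | rfl <;>
        by_cases hg : hand = "gawi" <;> by_cases hb : hand = "bawi" <;>
        by_cases ho : hand = "bo" <;>
        simp [hg, hb, ho, pvCollect2, pvFinish, pvPairTable]
    · have hL : (rest.length : Int) ≠ 0 := by
        intro h
        exact hr (List.length_eq_zero_iff.mp (by exact_mod_cast h))
      rcases hs with rfl | rfl | rfl | rfl <;>
        by_cases hg : hand = "gawi" <;> by_cases hb : hand = "bawi" <;>
        by_cases ho : hand = "bo" <;>
        simp [hg, hb, ho, pvCollect2, pvFinish, pvPairTable] <;>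
        (first
          | exact ih _ hr (by simp)
          | simp_all) <;>
        (rw [pvFinish.eq_def]; split <;> simp [pvPairTable])

-- A = common spec
lemma pv_A_char (records : List (String × String)) :
    show_me_the_hand records =
      if records = [] then "bo" else pvFinish (pvCollect2 records.reverse []) := by
  unfold show_me_the_hand
  rcases eq_or_ne records [] with rfl | hne
  · simp [show_me_the_hand_go]
  · rw [if_neg hne, ← List.length_reverse]
    have hrev : records.reverse ≠ [] := by simpa using hne
    simpa using pv_main records.reverse [] hrev (Or.inl rfl)

-- appending one record at the end updates the last-occurrence triple at index i + l.length
lemma pv_last3_append : ∀ (l : List (String × String)) (hand res : String) (i lg lb lo : Int),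
    pvLast3 (l ++ [(hand, res)]) i lg lb lo =
      (let u := pvLast3 l i lg lb lo
       if hand = "gawi" then (i + l.length, u.2.1, u.2.2)
       else if hand = "bawi" then (u.1, i + l.length, u.2.2)
       else if hand = "bo" then (u.1, u.2.1, i + l.length)
       else u) := by
  intro l
  induction l with
  | nil =>
    intro hand res i lg lb lo
    simp only [List.nil_append, pvLast3, List.length_nil]
    split_ifs <;> simp [pvLast3]
  | cons p rest ih =>
    intro hand res i lg lb lo
    obtain ⟨h0, r0⟩ := p
    simp only [List.cons_append, pvLast3, List.length_cons]
    have hc : ((rest.length + 1 : ℕ) : Int) = (rest.length : Int) + 1 := by push_cast; ring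
    split_ifs <;>
      · rw [ih]
        simp only [hc]
        rw [show i + 1 + (rest.length : Int) = i + ((rest.length : Int) + 1) by ring]
        split_ifs <;> simp_all

-- bounds: every accumulator component stays in [-1, i + l.length)
lemma pv_last3_bounds : ∀ (l : List (String × String)) (i lg lb lo : Int),
    -1 ≤ lg → -1 ≤ lb → -1 ≤ lo → lg < i → lb < i → lo < i → 0 ≤ i →
    (lg = lb → lg = -1) → (lb = lo → lb = -1) → (lg = lo → lg = -1) →
    (-1 ≤ (pvLast3 l i lg lb lo).1 ∧ -1 ≤ (pvLast3 l i lg lb lo).2.1 ∧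
     -1 ≤ (pvLast3 l i lg lb lo).2.2 ∧
     (pvLast3 l i lg lb lo).1 < i + l.length ∧ (pvLast3 l i lg lb lo).2.1 < i + l.length ∧
     (pvLast3 l i lg lb lo).2.2 < i + l.length ∧
     ((pvLast3 l i lg lb lo).1 = (pvLast3 l i lg lb lo).2.1 → (pvLast3 l i lg lb lo).1 = -1) ∧
     ((pvLast3 l i lg lb lo).2.1 = (pvLast3 l i lg lb lo).2.2 → (pvLast3 l i lg lb lo).2.1 = -1) ∧
     ((pvLast3 l i lg lb lo).1 = (pvLast3 l i lg lb lo).2.2 → (pvLast3 l i lg lb lo).1 = -1)) := by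
  intro l
  induction l with
  | nil => intro i lg lb lo h1 h2 h3 h4 h5 h6 h7 h8 h9 h10; simp [pvLast3]; omega
  | cons p rest ih =>
    intro i lg lb lo h1 h2 h3 h4 h5 h6 h7 h8 h9 h10
    obtain ⟨h0, r0⟩ := p
    simp only [pvLast3, List.length_cons]
    have hc : ((rest.length + 1 : ℕ) : Int) = (rest.length : Int) + 1 := by push_cast; ring
    simp only [hc]
    have hlen : i + ((rest.length : Int) + 1) = (i + 1) + rest.length := by ring
    rw [hlen]
    split_ifs <;>
      exact ih (i + 1) _ _ _ (by omega) (by omega) (by omega) (by omega) (by omega) (by omega)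
        (by omega) (by omega) (by omega) (by omega)

-- collecting into [h0]: the second distinct hand is the other hand with the larger last index
lemma pv_collect_gawi : ∀ (l : List (String × String)) (i : Int), 0 ≤ i →
    pvCollect2 l.reverse ["gawi"] =
      (let u := pvLast3 l i (-1) (-1) (-1)
       if u.2.1 < 0 ∧ u.2.2 < 0 then ["gawi"]
       else ["gawi", if u.2.2 < u.2.1 then "bawi" else "bo"]) := by
  intro l
  induction l using List.reverseRecOn with
  | nil => intro i hi; norm_num [pvCollect2, pvLast3]
  | append_singleton l p ih =>
    intro i hi
    obtain ⟨hand, res⟩ := p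
    obtain ⟨b1, b2, b3, b4, b5, b6, b7, b8, b9⟩ := pv_last3_bounds l i (-1) (-1) (-1)
      (by norm_num) (by norm_num) (by norm_num) (by omega) (by omega) (by omega) hi
      (by omega) (by omega) (by omega)
    rw [List.reverse_append, pv_last3_append]
    by_cases hg : hand = "gawi" <;> by_cases hbw : hand = "bawi" <;> by_cases ho : hand = "bo"
    · simp_all
    · simp_all
    · simp_all
    · subst hg; simp [pvCollect2]; exact ih i hi
    · simp_all
    · subst hbw
      simp [pvCollect2]
      rw [if_neg (by omega), if_pos (by omega)]
    · subst ho
      simp [pvCollect2]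
      rw [if_neg (by omega), if_neg (by omega)]
    · simp [pvCollect2, hg, hbw, ho]; exact ih i hi

lemma pv_collect_bawi : ∀ (l : List (String × String)) (i : Int), 0 ≤ i →
    pvCollect2 l.reverse ["bawi"] =
      (let u := pvLast3 l i (-1) (-1) (-1)
       if u.1 < 0 ∧ u.2.2 < 0 then ["bawi"]
       else ["bawi", if u.2.2 < u.1 then "gawi" else "bo"]) := by
  intro l
  induction l using List.reverseRecOn with
  | nil => intro i hi; norm_num [pvCollect2, pvLast3]
  | append_singleton l p ih =>
    intro i hi
    obtain ⟨hand, res⟩ := p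
    obtain ⟨b1, b2, b3, b4, b5, b6, b7, b8, b9⟩ := pv_last3_bounds l i (-1) (-1) (-1)
      (by norm_num) (by norm_num) (by norm_num) (by omega) (by omega) (by omega) hi
      (by omega) (by omega) (by omega)
    rw [List.reverse_append, pv_last3_append]
    by_cases hg : hand = "gawi" <;> by_cases hbw : hand = "bawi" <;> by_cases ho : hand = "bo"
    · simp_all
    · simp_all
    · simp_all
    · subst hg
      simp [pvCollect2]
      rw [if_neg (by omega), if_pos (by omega)]
    · simp_all
    · subst hbw; simp [pvCollect2]; exact ih i hi
    · subst ho
      simp [pvCollect2]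
      rw [if_neg (by omega), if_neg (by omega)]
    · simp [pvCollect2, hg, hbw, ho]; exact ih i hi

lemma pv_collect_bo : ∀ (l : List (String × String)) (i : Int), 0 ≤ i →
    pvCollect2 l.reverse ["bo"] =
      (let u := pvLast3 l i (-1) (-1) (-1)
       if u.1 < 0 ∧ u.2.1 < 0 then ["bo"]
       else ["bo", if u.2.1 < u.1 then "gawi" else "bawi"]) := by
  intro l
  induction l using List.reverseRecOn with
  | nil => intro i hi; norm_num [pvCollect2, pvLast3]
  | append_singleton l p ih =>
    intro i hi
    obtain ⟨hand, res⟩ := p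
    obtain ⟨b1, b2, b3, b4, b5, b6, b7, b8, b9⟩ := pv_last3_bounds l i (-1) (-1) (-1)
      (by norm_num) (by norm_num) (by norm_num) (by omega) (by omega) (by omega) hi
      (by omega) (by omega) (by omega)
    rw [List.reverse_append, pv_last3_append]
    by_cases hg : hand = "gawi" <;> by_cases hbw : hand = "bawi" <;> by_cases ho : hand = "bo"
    · simp_all
    · simp_all
    · simp_all
    · subst hg
      simp [pvCollect2]
      rw [if_neg (by omega), if_pos (by omega)]
    · simp_all
    · subst hbw
      simp [pvCollect2]
      rw [if_neg (by omega), if_neg (by omega)]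
    · subst ho; simp [pvCollect2]; exact ih i hi
    · simp [pvCollect2, hg, hbw, ho]; exact ih i hi

-- B = common spec on nonempty lists
set_option maxHeartbeats 1000000 in
lemma pv_B_char : ∀ (records : List (String × String)), records ≠ [] →
    show_me_the_hand_alt records = pvFinish (pvCollect2 records.reverse []) := by
  intro records
  induction records using List.reverseRecOn with
  | nil => intro h; exact absurd rfl h
  | append_singleton l p ih =>
    intro _
    obtain ⟨hand, res⟩ := p
    obtain ⟨b1, b2, b3, b4, b5, b6, b7, b8, b9⟩ := pv_last3_bounds l 0 (-1) (-1) (-1)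
      (by norm_num) (by norm_num) (by norm_num) (by norm_num) (by norm_num) (by norm_num) le_rfl
      (by omega) (by omega) (by omega)
    unfold show_me_the_hand_alt
    rw [List.reverse_append, pv_last3_append]
    simp only [List.reverse_singleton, List.singleton_append]
    by_cases hg : hand = "gawi" <;> by_cases hbw : hand = "bawi" <;> by_cases ho : hand = "bo"
    · simp_all
    · simp_all
    · simp_all
    · clear ih
      subst hg
      rw [show pvCollect2 (("gawi", res) :: l.reverse) [] = pvCollect2 l.reverse ["gawi"] by
        simp [pvCollect2]]
      rw [pv_collect_gawi l 0 le_rfl, if_pos rfl]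
      revert b1 b2 b3 b4 b5 b6 b7 b8 b9
      generalize pvLast3 l 0 (-1) (-1) (-1) = u
      obtain ⟨ug, ub, uo⟩ := u
      intro b1 b2 b3 b4 b5 b6 b7 b8 b9
      simp only [pvTop2, Prod.fst, Prod.snd]
      split_ifs <;>
        first
          | rfl
          | omega
          | (simp only [pvFinish, pvPairTable]; first | rfl | omega)
          | (exfalso; omega)
          | (simp_all; omega)
          | simp_all
          | (simp_all [pvFinish, pvPairTable]; omega)
          | simp_all [pvFinish, pvPairTable]
    · simp_all
    · clear ih
      subst hbw
      rw [show pvCollect2 (("bawi", res) :: l.reverse) [] = pvCollect2 l.reverse ["bawi"] by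
        simp [pvCollect2]]
      rw [pv_collect_bawi l 0 le_rfl, if_neg hg, if_pos rfl]
      revert b1 b2 b3 b4 b5 b6 b7 b8 b9
      generalize pvLast3 l 0 (-1) (-1) (-1) = u
      obtain ⟨ug, ub, uo⟩ := u
      intro b1 b2 b3 b4 b5 b6 b7 b8 b9
      simp only [pvTop2, Prod.fst, Prod.snd]
      split_ifs <;>
        first
          | rfl
          | omega
          | (simp only [pvFinish, pvPairTable]; first | rfl | omega)
          | (exfalso; omega)
          | (simp_all; omega)
          | simp_all
          | (simp_all [pvFinish, pvPairTable]; omega)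
          | simp_all [pvFinish, pvPairTable]
    · clear ih
      subst ho
      rw [show pvCollect2 (("bo", res) :: l.reverse) [] = pvCollect2 l.reverse ["bo"] by
        simp [pvCollect2]]
      rw [pv_collect_bo l 0 le_rfl, if_neg hg, if_neg hbw, if_pos rfl]
      revert b1 b2 b3 b4 b5 b6 b7 b8 b9
      generalize pvLast3 l 0 (-1) (-1) (-1) = u
      obtain ⟨ug, ub, uo⟩ := u
      intro b1 b2 b3 b4 b5 b6 b7 b8 b9
      simp only [pvTop2, Prod.fst, Prod.snd]
      split_ifs <;>
        first
          | rfl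
          | omega
          | (simp only [pvFinish, pvPairTable]; first | rfl | omega)
          | (exfalso; omega)
          | (simp_all; omega)
          | simp_all
          | (simp_all [pvFinish, pvPairTable]; omega)
          | simp_all [pvFinish, pvPairTable]
    · rcases eq_or_ne l [] with rfl | hl
      · simp [pvLast3, pvCollect2, pvTop2, pvFinish, hg, hbw, ho]
      · have hIH := ih hl
        unfold show_me_the_hand_alt at hIH
        simp only [hl, if_false] at hIH
        rw [show pvCollect2 ((hand, res) :: l.reverse) [] = pvCollect2 l.reverse [] by
          simp [pvCollect2, hg, hbw, ho]]
        simp only [hg, hbw, ho, if_false]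
        simpa using hIH

-- ===== VERDICT (by name: the statement is the Claim_ definition above) =====
theorem show_me_the_hand_spec : Claim_equal_show_me_the_hand := by
  intro records _
  unfold Spec_show_me_the_hand
  rw [pv_A_char]
  rcases eq_or_ne records [] with rfl | hne
  · simp [show_me_the_hand_alt, pvLast3, pvTop2]
  · rw [if_neg hne, pv_B_char records hne]
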